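-- pv_equiv track=rewrite | github.com/OTOYO1020/ChatDev_Intermediate | WareHouse/C_179_DefaultOrganization_20250503085749/tuple_counter.py | count_valid_tuples
-- ===== SOURCE A (Python) =====
-- def count_valid_tuples(N):
--     '''
--     Function to count valid tuples (A, B, C) for a given positive integer N.
--     Parameters:
--     N (int): The positive integer input by the user.
--     Returns:
--     int: The count of valid tuples.
--     '''
--     count = 0
--     for A in range(1, N):
--         # Loop through all possible values of B ensuring A * B < N
--         for B in range(1, (N - 1) // A + 1):  # Adjusted to ensure A * B < N
--             C = N - (A * B)  # Calculate C based on the equation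
--             if C > 0:  # Check if C is a positive integer
--                 count += 1
--     return count
-- ===== SOURCE B (Python) =====
-- def count_valid_tuples(N):
--     # Count = sum_{A=1}^{N-1} floor((N-1)/A), computed by divisor blocks in O(sqrt(N)).
--     M = N - 1
--     total = 0
--     a = 1
--     while a <= M:
--         q = M // a
--         nxt = M // q + 1  # first a' with a smaller quotient
--         total += q * (nxt - a)
--         a = nxt
--     return total
-- ===== Notes on version B (the rewrite author's own statement) =====
-- stated objective: faster
-- what changed: Replaced the nested O(N log N) double loop (which just counts every B in 1..(N-1)//A for each A) by the closed-form sum of floor((N-1)/A) evaluated with the divisor-block trick, grouping all A with equal quotient into one block, in O(sqrt(N)).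
import Mathlib
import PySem

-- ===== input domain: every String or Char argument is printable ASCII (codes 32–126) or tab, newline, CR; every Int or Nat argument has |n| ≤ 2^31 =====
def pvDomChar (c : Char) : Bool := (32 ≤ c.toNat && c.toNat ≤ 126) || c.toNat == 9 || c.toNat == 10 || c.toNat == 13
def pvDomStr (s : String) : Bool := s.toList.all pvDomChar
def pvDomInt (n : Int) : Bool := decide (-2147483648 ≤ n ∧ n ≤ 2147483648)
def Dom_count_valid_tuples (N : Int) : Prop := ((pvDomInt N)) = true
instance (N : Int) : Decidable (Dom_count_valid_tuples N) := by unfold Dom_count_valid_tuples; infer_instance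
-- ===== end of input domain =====

-- B replaces A's nested counting loops by a divisor-block evaluation of
-- sum_{A=1}^{N-1} floor((N-1)/A); objective: faster (asymptotic, O(sqrt N) vs O(N log N)).


-- ===== PORT A =====
def count_valid_tuples (N : Int) : Int :=
  (PySem.List.pyRange 1 N 1).foldl (fun count A =>
    (PySem.List.pyRange 1 (PySem.Int.floordiv (N - 1) A + 1) 1).foldl (fun count B =>
      let C := N - A * B
      if C > 0 then count + 1 else count) count) 0

-- ===== PORT B =====
-- the loop variable `a` starts at 1 and only grows; `1 ≤ a` is a totality guard for termination
theorem cvt_next_gt {M a : Int} (h1 : 1 ≤ a) (h2 : a ≤ M) :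
    a < PySem.Int.floordiv M (PySem.Int.floordiv M a) + 1 := by
  have hq : 1 ≤ PySem.Int.floordiv M a :=
    (PySem.Int.le_floordiv_iff_mul_le (by omega)).mpr (by omega)
  have hqa : PySem.Int.floordiv M a * a ≤ M :=
    (PySem.Int.le_floordiv_iff_mul_le (by omega)).mp le_rfl
  have : a ≤ PySem.Int.floordiv M (PySem.Int.floordiv M a) :=
    (PySem.Int.le_floordiv_iff_mul_le (by omega)).mpr (by nlinarith)
  omega

def cvtLoop (M a total : Int) : Int :=
  if h : 1 ≤ a ∧ a ≤ M then
    let q := PySem.Int.floordiv M a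
    let nxt := PySem.Int.floordiv M q + 1
    cvtLoop M nxt (total + q * (nxt - a))
  else total
termination_by (M + 1 - a).toNat
decreasing_by
  have := cvt_next_gt h.1 h.2
  omega

def count_valid_tuples_alt (N : Int) : Int :=
  cvtLoop (N - 1) 1 0

-- ===== PRECONDITION & SPEC =====
def Spec_count_valid_tuples (N : Int) (out : Int) : Prop := out = count_valid_tuples_alt N
instance (N : Int) (out : Int) : Decidable (Spec_count_valid_tuples N out) := by unfold Spec_count_valid_tuples; infer_instance

-- ===== CLAIM (what is proved, stated in full; the proofs are below) =====
def Claim_equal_count_valid_tuples : Prop := ∀ (N : Int), Dom_count_valid_tuples N → Spec_count_valid_tuples N (count_valid_tuples N)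

-- ===== LEMMAS AND PROOFS =====

-- S M a = sum_{i=a}^{M} floor(M/i)
def divSum (M a : Int) : Int :=
  if h : a ≤ M then PySem.Int.floordiv M a + divSum M (a + 1) else 0
termination_by (M + 1 - a).toNat
decreasing_by omega

theorem divSum_of_gt {M a : Int} (h : ¬ a ≤ M) : divSum M a = 0 := by
  rw [divSum]; simp [h]

theorem divSum_of_le {M a : Int} (h : a ≤ M) :
    divSum M a = PySem.Int.floordiv M a + divSum M (a + 1) := by
  rw [divSum]; simp [h]

-- quotient is constant on a block
theorem floordiv_block {M a i : Int} (h1 : 1 ≤ a) (ha : a ≤ i)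
    (hi : i ≤ PySem.Int.floordiv M (PySem.Int.floordiv M a)) (hM : a ≤ M) :
    PySem.Int.floordiv M i = PySem.Int.floordiv M a := by
  have hq : 1 ≤ PySem.Int.floordiv M a :=
    (PySem.Int.le_floordiv_iff_mul_le (by omega)).mpr (by omega)
  have hqa : PySem.Int.floordiv M a * a ≤ M :=
    (PySem.Int.le_floordiv_iff_mul_le (by omega)).mp le_rfl
  have hle : PySem.Int.floordiv M i ≤ PySem.Int.floordiv M a := by
    have hMi : PySem.Int.floordiv M i * i ≤ M :=
      (PySem.Int.le_floordiv_iff_mul_le (by omega)).mp le_rfl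
    have h0 : (0 : Int) ≤ PySem.Int.floordiv M i :=
      (PySem.Int.le_floordiv_iff_mul_le (by omega)).mpr (by nlinarith)
    refine (PySem.Int.le_floordiv_iff_mul_le (by omega)).mpr ?_
    nlinarith
  have hge : PySem.Int.floordiv M a ≤ PySem.Int.floordiv M i := by
    have hiq : i * PySem.Int.floordiv M a ≤ M := by
      have := (PySem.Int.le_floordiv_iff_mul_le (a := M) (b := PySem.Int.floordiv M a) (by omega)).mp hi
      linarith
    exact (PySem.Int.le_floordiv_iff_mul_le (by omega)).mpr (by nlinarith)
  omega

-- a run of equal quotients collapses to q * (b - a)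
theorem divSum_block {M q : Int} (a b : Int) (hab : a ≤ b) (hbM : b ≤ M + 1)
    (hconst : ∀ i, a ≤ i → i < b → PySem.Int.floordiv M i = q) :
    divSum M a = q * (b - a) + divSum M b := by
  obtain ⟨n, hn⟩ : ∃ n : Nat, b - a = n := ⟨(b - a).toNat, by omega⟩
  induction n generalizing a with
  | zero => have : a = b := by omega
            simp [this]
  | succ k ih =>
    have hab' : a < b := by omega
    have haM : a ≤ M := by omega
    rw [divSum_of_le haM, hconst a le_rfl hab',
        ih (a + 1) (by omega) (fun i h1 h2 => hconst i (by omega) h2) (by omega)]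
    ring

theorem cvtLoop_eq_divSum {M : Int} (a total : Int) (h1 : 1 ≤ a) :
    cvtLoop M a total = total + divSum M a := by
  rw [cvtLoop]
  by_cases h : a ≤ M
  · simp only [h1, h, and_self, dite_true]
    have hgt := cvt_next_gt h1 h
    have hle : PySem.Int.floordiv M (PySem.Int.floordiv M a) ≤ M := by
      have hq : 1 ≤ PySem.Int.floordiv M a :=
        (PySem.Int.le_floordiv_iff_mul_le (by omega)).mpr (by omega)
      by_contra hc
      have := (PySem.Int.le_floordiv_iff_mul_le (a := M) (b := PySem.Int.floordiv M a) (by omega)).mp (by omega : M + 1 ≤ PySem.Int.floordiv M (PySem.Int.floordiv M a))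
      nlinarith
    rw [cvtLoop_eq_divSum _ _ (by omega),
        divSum_block a (PySem.Int.floordiv M (PySem.Int.floordiv M a) + 1) (by omega) (by omega)
          (fun i hi1 hi2 => floordiv_block h1 hi1 (by omega) h)]
    ring
  · simp only [h, and_false, dite_false]
    rw [divSum_of_gt h]; ring
termination_by (M + 1 - a).toNat
decreasing_by
  have := cvt_next_gt h1 h
  omega

-- A's inner loop over B adds floor((N-1)/A) (every C is positive there)
theorem inner_loop_eq {N A : Int} (hA : 1 ≤ A) (hAN : A < N) (count : Int) :
    (PySem.List.pyRange 1 (PySem.Int.floordiv (N - 1) A + 1) 1).foldl (fun count B =>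
      let C := N - A * B
      if C > 0 then count + 1 else count) count
    = count + PySem.Int.floordiv (N - 1) A := by
  have hq0 : 0 ≤ PySem.Int.floordiv (N - 1) A :=
    (PySem.Int.le_floordiv_iff_mul_le (by omega)).mpr (by omega)
  have hcongr : (PySem.List.pyRange 1 (PySem.Int.floordiv (N - 1) A + 1) 1).foldl (fun count B =>
      let C := N - A * B
      if C > 0 then count + 1 else count) count
      = (PySem.List.pyRange 1 (PySem.Int.floordiv (N - 1) A + 1) 1).foldl (fun count _ => count + 1) count := by
    apply PySem.List.foldl_congr_mem
    intro c B hB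
    rw [PySem.List.mem_pyRange_one] at hB
    have hBle : A * B ≤ N - 1 := by
      have := (PySem.Int.le_floordiv_iff_mul_le (a := N - 1) (b := A) (by omega)).mp (by omega : B ≤ PySem.Int.floordiv (N - 1) A)
      nlinarith
    simp only []
    rw [if_pos (by omega)]
  rw [hcongr]
  have := PySem.List.foldl_add (l := PySem.List.pyRange 1 (PySem.Int.floordiv (N - 1) A + 1) 1)
    (g := fun _ => (1 : Int)) (a := count)
  rw [this]
  rw [PySem.List.sum_map_const_int, PySem.List.length_pyRange_one]
  omega

-- A's outer loop over a suffix range equals divSum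
theorem outer_loop_eq {N : Int} (a count : Int) (h1 : 1 ≤ a) :
    (PySem.List.pyRange a N 1).foldl (fun count A =>
      (PySem.List.pyRange 1 (PySem.Int.floordiv (N - 1) A + 1) 1).foldl (fun count B =>
        let C := N - A * B
        if C > 0 then count + 1 else count) count) count
    = count + divSum (N - 1) a := by
  by_cases h : a < N
  · rw [PySem.List.pyRange_one_cons h, List.foldl_cons,
        inner_loop_eq h1 h, outer_loop_eq (a + 1) _ (by omega),
        divSum_of_le (by omega : a ≤ N - 1)]
    ring
  · rw [PySem.List.pyRange_one_eq_nil (by omega), List.foldl_nil,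
        divSum_of_gt (by omega)]
    ring
termination_by (N - a).toNat
decreasing_by omega

-- ===== VERDICT (by name: the statement is the Claim_ definition above) =====
theorem count_valid_tuples_spec : Claim_equal_count_valid_tuples := by
  intro N _
  unfold Spec_count_valid_tuples count_valid_tuples count_valid_tuples_alt
  rw [outer_loop_eq 1 0 le_rfl, cvtLoop_eq_divSum 1 0 le_rfl]
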